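-- pv_equiv track=rewrite | github.com/wzygxr/shuati | class051_KnapsackProblem/Code50_DivisibleGroupSums.py | divisible_group_sums_optimized
-- ===== SOURCE A (Python) =====
-- from typing import List, Tuple
--
-- def divisible_group_sums_optimized(nums: List[int], M: int, D: int) -> int:
--     """
--     空间优化的解法 - 使用两个二维数组交替
--
--     Args:
--         nums: 整数数组
--         M: 需要选择的数字个数
--         D: 除数
--
--     Returns:
--         int: 方案数
--     """
--     if not nums:
--         return 1 if M == 0 else 0
--     if D == 0:
--         raise ValueError("Divisor D cannot be zero")
--     if M < 0 or M > len(nums):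
--         return 0
--
--     n = len(nums)
--
--     # 使用两个二维数组交替
--     dp = [[0] * D for _ in range(M + 1)]
--     next_dp = [[0] * D for _ in range(M + 1)]
--     dp[0][0] = 1
--
--     for i in range(n):
--         num = nums[i]
--         mod = (num % D + D) % D
--
--         # 复制当前状态到next_dp
--         for j in range(M + 1):
--             next_dp[j] = dp[j][:]
--
--         # 更新next_dp数组
--         for j in range(1, M + 1):
--             for k in range(D):
--                 prev_mod = (k - mod + D) % D
--                 next_dp[j][k] += dp[j - 1][prev_mod]
--
--         # 交换数组
--         dp, next_dp = next_dp, dp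
--
--         # 清空next_dp数组用于下一次迭代
--         for j in range(M + 1):
--             next_dp[j] = [0] * D
--
--     return dp[M][0]
-- ===== SOURCE B (Python) =====
-- from typing import List
--
--
-- def divisible_group_sums_optimized(nums: List[int], M: int, D: int) -> int:
--     """Top-down memoized recursion over suffixes instead of the double-buffer table."""
--     if not nums:
--         return 1 if M == 0 else 0
--     if D == 0:
--         raise ValueError("Divisor D cannot be zero")
--     n = len(nums)
--     if M < 0 or M > n:
--         return 0
--
--     memo = {}
--
--     def f(i: int, m: int, r: int) -> int:
--         # ways to pick m elements from nums[i:] whose sum is ≡ r (mod D)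
--         if i == n:
--             return 1 if (m == 0 and r == 0) else 0
--         key = (i, m, r)
--         if key not in memo:
--             ways = f(i + 1, m, r)
--             if m > 0:
--                 ways += f(i + 1, m - 1, (r - nums[i]) % D)
--             memo[key] = ways
--         return memo[key]
--
--     return f(0, M, 0)
-- ===== Notes on version B (the rewrite author's own statement) =====
-- stated objective: alternative
-- what changed: Replaces A's forward double-buffer DP (two (M+1)xD tables with per-element copy/add/swap/clear loops) by a top-down memoized recursion f(i, m, r) over suffixes of nums, counting ways to pick m elements from nums[i:] reaching residue r.
import Mathlib
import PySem

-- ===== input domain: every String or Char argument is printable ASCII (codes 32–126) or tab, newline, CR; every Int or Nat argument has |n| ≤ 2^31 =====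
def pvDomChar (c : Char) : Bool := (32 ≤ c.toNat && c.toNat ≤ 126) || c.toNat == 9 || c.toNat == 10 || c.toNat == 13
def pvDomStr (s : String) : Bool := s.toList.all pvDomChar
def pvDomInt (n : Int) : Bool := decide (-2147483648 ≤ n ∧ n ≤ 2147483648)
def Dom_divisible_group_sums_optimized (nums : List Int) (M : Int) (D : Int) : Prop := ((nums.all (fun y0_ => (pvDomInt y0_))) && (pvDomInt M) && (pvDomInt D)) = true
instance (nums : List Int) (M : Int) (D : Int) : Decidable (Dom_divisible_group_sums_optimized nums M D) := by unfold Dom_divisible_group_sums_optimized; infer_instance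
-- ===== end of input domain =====

-- B replaces A's forward double-buffer DP (copy/add/swap/clear of two (M+1)×D tables) by a
-- top-down recursion over suffixes f(i, m, r); equivalence of the return values is proved below.

-- ===== PORT A =====
-- literal transliteration: dp/next_dp are lists of rows, the loop state is the pair (dp, next_dp)
def divisible_group_sums_optimized (nums : List Int) (M : Int) (D : Int) : Int :=
  if nums = [] then (if M = 0 then 1 else 0)
  else if D = 0 then 0  -- Python: raise ValueError (outside Pre_)
  else if M < 0 ∨ M > PySem.List.len nums then 0
  else
    let n : Int := PySem.List.len nums
    let dp0 : List (List Int) := List.replicate (M + 1).toNat (List.replicate D.toNat (0 : Int))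
    let nd0 : List (List Int) := List.replicate (M + 1).toNat (List.replicate D.toNat (0 : Int))
    -- dp[0][0] = 1
    let dp1 := PySem.List.pySetD dp0 0 (PySem.List.pySetD (PySem.List.pyGetD dp0 0 []) 0 1)
    let res :=
      (PySem.List.pyRange 0 n 1).foldl (fun (st : List (List Int) × List (List Int)) i =>
        let num := PySem.List.pyGetD nums i 0
        let md := PySem.Int.mod (PySem.Int.mod num D + D) D
        -- for j in range(M+1): next_dp[j] = dp[j][:]
        let nd1 := (PySem.List.pyRange 0 (M + 1) 1).foldl
          (fun t j => PySem.List.pySetD t j (PySem.List.slice (PySem.List.pyGetD st.1 j []) none none)) st.2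
        -- for j in range(1, M+1): for k in range(D): next_dp[j][k] += dp[j-1][(k - mod + D) % D]
        let nd2 := (PySem.List.pyRange 1 (M + 1) 1).foldl
          (fun t j => (PySem.List.pyRange 0 D 1).foldl
            (fun t k => PySem.List.pySetD t j (PySem.List.pySetD (PySem.List.pyGetD t j []) k
              (PySem.List.pyGetD (PySem.List.pyGetD t j []) k 0 +
               PySem.List.pyGetD (PySem.List.pyGetD st.1 (j - 1) [])
                 (PySem.Int.mod (k - md + D) D) 0))) t) nd1
        -- dp, next_dp = next_dp, dp ;  for j in range(M+1): next_dp[j] = [0]*D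
        let nd3 := (PySem.List.pyRange 0 (M + 1) 1).foldl
          (fun t j => PySem.List.pySetD t j (List.replicate D.toNat (0 : Int))) st.1
        (nd2, nd3)) (dp1, nd0)
    PySem.List.pyGetD (PySem.List.pyGetD res.1 M []) 0 0

-- ===== PORT B =====
-- Source B's memoized f(i, m, r) recursing on nums[i:]; the memo dict is a pure value cache, so the
-- port is the same recursion on the suffix list (i ↦ drop i nums) without the cache
def pvAltF (D : Int) : List Int → Int → Int → Int
  | [], m, r => if m = 0 ∧ r = 0 then 1 else 0
  | x :: rest, m, r =>
    pvAltF D rest m r +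
      (if 0 < m then pvAltF D rest (m - 1) (PySem.Int.mod (r - x) D) else 0)

def divisible_group_sums_optimized_alt (nums : List Int) (M : Int) (D : Int) : Int :=
  if nums = [] then (if M = 0 then 1 else 0)
  else if D = 0 then 0  -- Source B: raise ValueError (outside Pre_)
  else if M < 0 ∨ M > PySem.List.len nums then 0
  else pvAltF D nums M 0

-- ===== PRECONDITION & SPEC =====
-- Pre_ excludes exactly the inputs where A raises: D = 0 reached (ValueError) and D < 0 with the
-- dp table actually built (rows [0]*D are empty, so dp[0][0] = 1 raises IndexError).
def Pre_divisible_group_sums_optimized (nums : List Int) (M : Int) (D : Int) : Prop :=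
  nums = [] ∨ (D ≠ 0 ∧ (M < 0 ∨ M > PySem.List.len nums ∨ 0 < D))
instance (nums : List Int) (M : Int) (D : Int) : Decidable (Pre_divisible_group_sums_optimized nums M D) := by unfold Pre_divisible_group_sums_optimized; infer_instance
def pvWitness_divisible_group_sums_optimized : List Int × Int × Int := ([1, 2, 3], 2, 3)

def Spec_divisible_group_sums_optimized (nums : List Int) (M : Int) (D : Int) (out : Int) : Prop := out = divisible_group_sums_optimized_alt nums M D
instance (nums : List Int) (M : Int) (D : Int) (out : Int) : Decidable (Spec_divisible_group_sums_optimized nums M D out) := by unfold Spec_divisible_group_sums_optimized; infer_instance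

-- ===== CLAIM (what is proved, stated in full; the proofs are below) =====
def Claim_equal_divisible_group_sums_optimized : Prop := ∀ (nums : List Int) (M : Int) (D : Int), Dom_divisible_group_sums_optimized nums M D → Pre_divisible_group_sums_optimized nums M D → Spec_divisible_group_sums_optimized nums M D (divisible_group_sums_optimized nums M D)

-- ===== LEMMAS AND PROOFS =====


lemma pv_getD_set {α : Type} (l : List α) (n m : Nat) (v d : α) :
    (l.set n v).getD m d = if n = m ∧ n < l.length then v else l.getD m d := by
  simp only [List.getD_eq_getElem?_getD, List.getElem?_set]
  split_ifs with h1 h2 h2 <;> simp_all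
  omega

lemma pv_pyGetD_nonneg {α : Type} (xs : List α) (i : Int) (d : α) (h : 0 ≤ i) :
    PySem.List.pyGetD xs i d = xs.getD i.toNat d := by
  rw [← Int.toNat_of_nonneg h, PySem.List.pyGetD_natCast, Int.toNat_natCast]

lemma pv_fold_set_const {α : Type} (v : Int → α) (d : α) :
    ∀ (c : Nat) (a b : Int) (t : List α), 0 ≤ a → (b - a).toNat = c →
    (((PySem.List.pyRange a b 1).foldl (fun t j => PySem.List.pySetD t j (v j)) t).length = t.length ∧
     ∀ m : Nat, ((PySem.List.pyRange a b 1).foldl (fun t j => PySem.List.pySetD t j (v j)) t).getD m d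
       = if a ≤ (m : Int) ∧ (m : Int) < b ∧ m < t.length then v m else t.getD m d) := by
  intro c
  induction c with
  | zero =>
    intro a b t ha hc
    rw [PySem.List.pyRange_one_eq_nil (by omega)]
    refine ⟨rfl, fun m => ?_⟩
    rw [if_neg (by omega)]
    rfl
  | succ c ih =>
    intro a b t ha hc
    rw [PySem.List.pyRange_one_cons (by omega)]
    simp only [List.foldl_cons]
    rw [PySem.List.pySetD_of_nonneg t (v a) ha]
    obtain ⟨ihl, ihg⟩ := ih (a + 1) b (t.set a.toNat (v a)) (by omega) (by omega)
    refine ⟨by rw [ihl, List.length_set], fun m => ?_⟩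
    rw [ihg m, pv_getD_set]
    simp only [List.length_set]
    by_cases hm : a = (m : Int)
    · rw [if_neg (show ¬((a + 1 : Int) ≤ (m : Int) ∧ (m : Int) < b ∧ m < t.length) by omega)]
      by_cases hl : m < t.length
      · rw [if_pos ⟨by omega, by omega⟩, if_pos ⟨by omega, by omega, hl⟩, hm]
      · rw [if_neg (by omega), if_neg (by omega)]
    · rw [if_neg (show ¬((a : Int).toNat = m ∧ (a : Int).toNat < t.length) by omega)]
      by_cases hc3 : a ≤ (m : Int) ∧ (m : Int) < b ∧ m < t.length
      · rw [if_pos (show (a + 1 : Int) ≤ (m : Int) ∧ (m : Int) < b ∧ m < t.length by omega),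
            if_pos hc3]
      · rw [if_neg (show ¬((a + 1 : Int) ≤ (m : Int) ∧ (m : Int) < b ∧ m < t.length) by omega),
            if_neg hc3]

lemma pv_fold_bump (w : Int → Int) (j : Int) :
    ∀ (c : Nat) (a b : Int) (t : List (List Int)), 0 ≤ a → 0 ≤ j → j < (t.length : Int) →
      b ≤ ((t.getD j.toNat []).length : Int) → (b - a).toNat = c →
    (((PySem.List.pyRange a b 1).foldl
        (fun t k => PySem.List.pySetD t j (PySem.List.pySetD (PySem.List.pyGetD t j []) k
          (PySem.List.pyGetD (PySem.List.pyGetD t j []) k 0 + w k))) t).length = t.length ∧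
     (∀ m : Nat, (m : Int) ≠ j →
        ((PySem.List.pyRange a b 1).foldl
          (fun t k => PySem.List.pySetD t j (PySem.List.pySetD (PySem.List.pyGetD t j []) k
            (PySem.List.pyGetD (PySem.List.pyGetD t j []) k 0 + w k))) t).getD m [] = t.getD m []) ∧
     (((PySem.List.pyRange a b 1).foldl
        (fun t k => PySem.List.pySetD t j (PySem.List.pySetD (PySem.List.pyGetD t j []) k
          (PySem.List.pyGetD (PySem.List.pyGetD t j []) k 0 + w k))) t).getD j.toNat []).length
        = (t.getD j.toNat []).length ∧
     ∀ k : Nat, (((PySem.List.pyRange a b 1).foldl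
        (fun t k => PySem.List.pySetD t j (PySem.List.pySetD (PySem.List.pyGetD t j []) k
          (PySem.List.pyGetD (PySem.List.pyGetD t j []) k 0 + w k))) t).getD j.toNat []).getD k 0
        = (t.getD j.toNat []).getD k 0 + (if a ≤ (k : Int) ∧ (k : Int) < b then w k else 0)) := by
  intro c
  induction c with
  | zero =>
    intro a b t ha hj0 hj1 hb hc
    rw [PySem.List.pyRange_one_eq_nil (by omega)]
    exact ⟨rfl, fun m _ => rfl, rfl, fun k => by rw [if_neg (by omega)]; simp⟩
  | succ c ih =>
    intro a b t ha hj0 hj1 hb hc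
    rw [PySem.List.pyRange_one_cons (by omega)]
    simp only [List.foldl_cons]
    rw [pv_pyGetD_nonneg t j [] hj0]
    set row := t.getD j.toNat [] with hrow
    rw [pv_pyGetD_nonneg row a 0 ha, PySem.List.pySetD_of_nonneg row _ ha,
        PySem.List.pySetD_of_nonneg t _ hj0]
    set nrow := row.set a.toNat (row.getD a.toNat 0 + w a) with hnrow
    have hjlen : j.toNat < t.length := by omega
    have hrowlen : nrow.length = row.length := List.length_set ..
    have ht' : (t.set j.toNat nrow).getD j.toNat [] = nrow := by
      rw [pv_getD_set]; rw [if_pos ⟨rfl, hjlen⟩]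
    obtain ⟨ihl, ihm, ihrl, ihk⟩ := ih (a + 1) b (t.set j.toNat nrow)
      (by omega) hj0 (by rw [List.length_set]; omega)
      (by rw [ht', hrowlen]; omega) (by omega)
    refine ⟨by rw [ihl, List.length_set], fun m hm => ?_, ?_, fun k => ?_⟩
    · rw [ihm m hm, pv_getD_set, if_neg (by omega)]
    · rw [ihrl, ht', hrowlen]
    · rw [ihk k, ht']
      by_cases hk : a = (k : Int)
      · have hkn : a.toNat = k := by omega
        rw [if_neg (by omega), if_pos (by omega)]
        rw [hnrow, pv_getD_set, if_pos ⟨hkn, by omega⟩, hkn, hk]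
        ring
      · rw [hnrow, pv_getD_set, if_neg (by omega)]
        by_cases hc3 : a ≤ (k : Int) ∧ (k : Int) < b
        · rw [if_pos (by omega), if_pos hc3]
        · rw [if_neg (by omega), if_neg hc3]


lemma pv_mod_shift (k x D : Int) (hD : 0 < D) :
    PySem.Int.mod (k - PySem.Int.mod (PySem.Int.mod x D + D) D + D) D = PySem.Int.mod (k - x) D := by
  simp only [PySem.Int.mod_eq_emod_of_pos hD]
  have h1 : (x % D + D) % D = x % D := by
    rw [Int.add_emod_right, Int.emod_emod_of_dvd _ dvd_rfl]
  rw [h1, Int.add_emod_right, Int.sub_emod k (x % D), Int.sub_emod k x,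
      Int.emod_emod_of_dvd _ dvd_rfl]

lemma pv_altF_concat (D x : Int) (hD : 0 < D) :
    ∀ (l : List Int) (m r : Int),
      pvAltF D (l ++ [x]) m r =
        pvAltF D l m r + (if 0 < m then pvAltF D l (m - 1) (PySem.Int.mod (r - x) D) else 0) := by
  have key : ∀ a b : Int, PySem.Int.mod (PySem.Int.mod a D - b) D = PySem.Int.mod (a - b) D := by
    intro a b
    simp only [PySem.Int.mod_eq_emod_of_pos hD]
    rw [Int.sub_emod (a % D) b, Int.emod_emod_of_dvd _ dvd_rfl, ← Int.sub_emod]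
  intro l
  induction l with
  | nil => intro m r; simp [pvAltF]
  | cons y l ih =>
    intro m r
    simp only [List.cons_append, pvAltF, ih]
    by_cases h : 0 < m
    · simp only [if_pos h]
      by_cases h2 : 0 < m - 1
      · simp only [if_pos h2, key]
        rw [show r - y - x = r - x - y from by ring]
        ring
      · simp only [if_neg h2]; try ring
    · simp only [if_neg h]; try ring

def pvInv (D : Int) (M : Int) (pre : List Int) (dp : List (List Int)) : Prop :=
  dp.length = (M + 1).toNat ∧
  (∀ m : Nat, m < (M + 1).toNat → (dp.getD m []).length = D.toNat) ∧
  (∀ j k : Nat, j < (M + 1).toNat → k < D.toNat →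
    (dp.getD j []).getD k 0 = pvAltF D pre (j : Int) (k : Int))

lemma pv_fold_rows (D md : Int) (dp : List (List Int)) (hD : 0 < D) :
    ∀ (c : Nat) (a b : Int) (t : List (List Int)), 1 ≤ a → b ≤ (t.length : Int) →
      (∀ m : Nat, m < t.length → (t.getD m []).length = D.toNat) → (b - a).toNat = c →
    (((PySem.List.pyRange a b 1).foldl
        (fun t j => (PySem.List.pyRange 0 D 1).foldl
          (fun t k => PySem.List.pySetD t j (PySem.List.pySetD (PySem.List.pyGetD t j []) k
            (PySem.List.pyGetD (PySem.List.pyGetD t j []) k 0 +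
             PySem.List.pyGetD (PySem.List.pyGetD dp (j - 1) [])
               (PySem.Int.mod (k - md + D) D) 0))) t) t).length = t.length ∧
     (∀ m : Nat, m < t.length →
        (((PySem.List.pyRange a b 1).foldl
          (fun t j => (PySem.List.pyRange 0 D 1).foldl
            (fun t k => PySem.List.pySetD t j (PySem.List.pySetD (PySem.List.pyGetD t j []) k
              (PySem.List.pyGetD (PySem.List.pyGetD t j []) k 0 +
               PySem.List.pyGetD (PySem.List.pyGetD dp (j - 1) [])
                 (PySem.Int.mod (k - md + D) D) 0))) t) t).getD m []).length = D.toNat) ∧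
     (∀ m : Nat, ((m : Int) < a ∨ b ≤ (m : Int)) →
        ((PySem.List.pyRange a b 1).foldl
          (fun t j => (PySem.List.pyRange 0 D 1).foldl
            (fun t k => PySem.List.pySetD t j (PySem.List.pySetD (PySem.List.pyGetD t j []) k
              (PySem.List.pyGetD (PySem.List.pyGetD t j []) k 0 +
               PySem.List.pyGetD (PySem.List.pyGetD dp (j - 1) [])
                 (PySem.Int.mod (k - md + D) D) 0))) t) t).getD m [] = t.getD m []) ∧
     (∀ m : Nat, a ≤ (m : Int) → (m : Int) < b → ∀ k : Nat,
        (((PySem.List.pyRange a b 1).foldl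
          (fun t j => (PySem.List.pyRange 0 D 1).foldl
            (fun t k => PySem.List.pySetD t j (PySem.List.pySetD (PySem.List.pyGetD t j []) k
              (PySem.List.pyGetD (PySem.List.pyGetD t j []) k 0 +
               PySem.List.pyGetD (PySem.List.pyGetD dp (j - 1) [])
                 (PySem.Int.mod (k - md + D) D) 0))) t) t).getD m []).getD k 0
          = (t.getD m []).getD k 0 +
            (if (k : Int) < D then
              PySem.List.pyGetD (PySem.List.pyGetD dp ((m : Int) - 1) [])
                (PySem.Int.mod ((k : Int) - md + D) D) 0 else 0))):= by
  intro c
  induction c with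
  | zero =>
    intro a b t ha hb hrow hc
    rw [PySem.List.pyRange_one_eq_nil (show b ≤ a by omega)]
    exact ⟨rfl, hrow, fun m _ => rfl, fun m hm1 hm2 k => (by omega : False).elim⟩
  | succ c ih =>
    intro a b t ha hb hrow hc
    rw [PySem.List.pyRange_one_cons (show a < b by omega)]
    simp only [List.foldl_cons]
    have H := pv_fold_bump (fun k => PySem.List.pyGetD (PySem.List.pyGetD dp (a - 1) [])
        (PySem.Int.mod (k - md + D) D) 0) a D.toNat 0 D t (le_refl 0) (by omega) (by omega)
        (by rw [hrow a.toNat (by omega)]; omega) (by omega)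
    beta_reduce at H
    obtain ⟨Hl, Hm, Hrl, Hk⟩ := H
    obtain ⟨ihl, ihrow, ihunch, ihval⟩ := ih (a + 1) b _ (by omega) (by rw [Hl]; omega)
      (by
        intro m hm
        rw [Hl] at hm
        by_cases hma : (m : Int) = a
        · have : m = a.toNat := by omega
          rw [this, Hrl, hrow a.toNat (by omega)]
        · rw [Hm m hma]
          exact hrow m hm)
      (by omega)
    refine ⟨ihl.trans Hl, ?_, ?_, ?_⟩
    · intro m hm
      exact ihrow m (by rw [Hl]; exact hm)
    · intro m hm
      rw [ihunch m (by omega), Hm m (by omega)]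
    · intro m hm1 hm2 k
      by_cases hma : (m : Int) = a
      · rw [ihunch m (by omega), show m = a.toNat from by omega, Hk k,
            show ((a.toNat : Nat) : Int) = a from by omega]
        by_cases hkD : (k : Int) < D
        · rw [if_pos ⟨by omega, hkD⟩, if_pos hkD]
        · rw [if_neg (by omega), if_neg hkD]
      · rw [ihval m (by omega) hm2 k, Hm m hma]

lemma pv_step (D M x : Int) (pre : List Int) (dp nd : List (List Int))
    (hD : 0 < D) (hM : 0 ≤ M) (hdp : pvInv D M pre dp) (hnd : nd.length = (M + 1).toNat) :
    pvInv D M (pre ++ [x])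
      ((PySem.List.pyRange 1 (M + 1) 1).foldl
        (fun t j => (PySem.List.pyRange 0 D 1).foldl
          (fun t k => PySem.List.pySetD t j (PySem.List.pySetD (PySem.List.pyGetD t j []) k
            (PySem.List.pyGetD (PySem.List.pyGetD t j []) k 0 +
             PySem.List.pyGetD (PySem.List.pyGetD dp (j - 1) [])
               (PySem.Int.mod (k - PySem.Int.mod (PySem.Int.mod x D + D) D + D) D) 0))) t)
        ((PySem.List.pyRange 0 (M + 1) 1).foldl
          (fun t j => PySem.List.pySetD t j (PySem.List.slice (PySem.List.pyGetD dp j []) none none)) nd)) ∧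
    ((PySem.List.pyRange 0 (M + 1) 1).foldl
      (fun t j => PySem.List.pySetD t j (List.replicate D.toNat (0 : Int))) dp).length = (M + 1).toNat := by
  obtain ⟨hdl, hdrow, hdval⟩ := hdp
  obtain ⟨Cl, Cg⟩ := pv_fold_set_const
    (fun j => PySem.List.slice (PySem.List.pyGetD dp j []) none none) ([] : List Int)
    (M + 1).toNat 0 (M + 1) nd (le_refl 0) (by omega)
  have hnd1 : ∀ m : Nat, m < (M + 1).toNat →
      ((PySem.List.pyRange 0 (M + 1) 1).foldl
        (fun t j => PySem.List.pySetD t j (PySem.List.slice (PySem.List.pyGetD dp j []) none none)) nd).getD m []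
      = dp.getD m [] := by
    intro m hm
    rw [Cg m, if_pos ⟨by omega, by omega, by omega⟩, PySem.List.slice_none_none,
        PySem.List.pyGetD_natCast]
  obtain ⟨Rl, Rrow, Runch, Rval⟩ := pv_fold_rows D (PySem.Int.mod (PySem.Int.mod x D + D) D) dp hD
    M.toNat 1 (M + 1) _ (le_refl 1) (by rw [Cl]; omega)
    (by
      intro m hm
      rw [Cl, hnd] at hm
      rw [hnd1 m hm]
      exact hdrow m hm)
    (by omega)
  have hlen2 : ∀ {u : List (List Int)}, u.length = nd.length → u.length = (M + 1).toNat := by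
    intro u h; rw [h, hnd]
  refine ⟨⟨hlen2 (Rl.trans Cl), ?_, ?_⟩, ?_⟩
  · intro m hm
    exact Rrow m (by rw [Rl] at *; omega)
  · intro j k hj hk
    by_cases hj0 : j = 0
    · subst hj0
      rw [Runch 0 (Or.inl (by omega)), hnd1 0 (by omega), hdval 0 k (by omega) hk,
          pv_altF_concat D x hD, if_neg (by omega)]
      ring
    · rw [Rval j (by omega) (by omega) k, hnd1 j hj, if_pos (by omega), pv_mod_shift _ _ _ hD]
      have hr2a : 0 ≤ PySem.Int.mod ((k : Int) - x) D := PySem.Int.mod_nonneg _ hD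
      have hr2b : PySem.Int.mod ((k : Int) - x) D < D := PySem.Int.mod_lt _ hD
      rw [pv_pyGetD_nonneg dp ((j : Int) - 1) [] (by omega),
          pv_pyGetD_nonneg _ _ 0 hr2a,
          show ((j : Int) - 1).toNat = j - 1 from by omega,
          hdval (j - 1) (PySem.Int.mod ((k : Int) - x) D).toNat (by omega) (by omega),
          hdval j k hj hk, pv_altF_concat D x hD, if_pos (by omega),
          show (((j - 1 : Nat) : Nat) : Int) = (j : Int) - 1 from by omega,
          Int.toNat_of_nonneg hr2a]
  · obtain ⟨Zl, _⟩ := pv_fold_set_const (fun _ => List.replicate D.toNat (0 : Int)) ([] : List Int)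
      (M + 1).toNat 0 (M + 1) dp (le_refl 0) (by omega)
    rw [Zl, hdl]

lemma pv_loop (D M : Int) (hD : 0 < D) (hM : 0 ≤ M) :
    ∀ (l pre : List Int) (dp nd : List (List Int)),
      pvInv D M pre dp → nd.length = (M + 1).toNat →
      pvInv D M (pre ++ l)
        ((l.foldl (fun (st : List (List Int) × List (List Int)) num =>
          let md := PySem.Int.mod (PySem.Int.mod num D + D) D
          let nd1 := (PySem.List.pyRange 0 (M + 1) 1).foldl
            (fun t j => PySem.List.pySetD t j (PySem.List.slice (PySem.List.pyGetD st.1 j []) none none)) st.2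
          let nd2 := (PySem.List.pyRange 1 (M + 1) 1).foldl
            (fun t j => (PySem.List.pyRange 0 D 1).foldl
              (fun t k => PySem.List.pySetD t j (PySem.List.pySetD (PySem.List.pyGetD t j []) k
                (PySem.List.pyGetD (PySem.List.pyGetD t j []) k 0 +
                 PySem.List.pyGetD (PySem.List.pyGetD st.1 (j - 1) [])
                   (PySem.Int.mod (k - md + D) D) 0))) t) nd1
          let nd3 := (PySem.List.pyRange 0 (M + 1) 1).foldl
            (fun t j => PySem.List.pySetD t j (List.replicate D.toNat (0 : Int))) st.1
          (nd2, nd3)) (dp, nd)).1) := by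
  intro l
  induction l with
  | nil =>
    intro pre dp nd hdp _
    simpa using hdp
  | cons x l ih =>
    intro pre dp nd hdp hnd
    simp only [List.foldl_cons]
    have hstep := pv_step D M x pre dp nd hD hM hdp hnd
    have h2 := ih (pre ++ [x]) _ _ hstep.1 hstep.2
    simpa [List.append_assoc] using h2

lemma pv_getD_replicate {α : Type} (n m : Nat) (x d : α) :
    (List.replicate n x).getD m d = if m < n then x else d := by
  rw [List.getD_eq_getElem?_getD, List.getElem?_replicate]
  split_ifs <;> rfl

lemma pv_init (D M : Int) (hM : 0 ≤ M) :
    pvInv D M []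
      (PySem.List.pySetD (List.replicate (M + 1).toNat (List.replicate D.toNat (0 : Int))) 0
        (PySem.List.pySetD
          (PySem.List.pyGetD (List.replicate (M + 1).toNat (List.replicate D.toNat (0 : Int))) 0 []) 0 1)) := by
  rw [PySem.List.pyGetD_zero, PySem.List.pySetD_of_nonneg _ _ (le_refl 0),
      PySem.List.pySetD_of_nonneg _ _ (le_refl 0)]
  rw [show ((0 : Int).toNat) = 0 from rfl, pv_getD_replicate, if_pos (by omega)]
  refine ⟨by simp, ?_, ?_⟩
  · intro m hm
    rw [pv_getD_set]
    split_ifs with h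
    · simp
    · rw [pv_getD_replicate, if_pos (by simpa using hm)]
      simp
  · intro j k hj hk
    rw [pv_getD_set]
    by_cases hj0 : j = 0
    · subst hj0
      rw [if_pos ⟨rfl, by simpa using hj⟩, pv_getD_set, List.length_replicate]
      by_cases hk0 : k = 0
      · subst hk0
        rw [if_pos ⟨rfl, by omega⟩]
        simp [pvAltF]
      · rw [if_neg (by omega), pv_getD_replicate, if_pos (by omega)]
        simp only [pvAltF]
        rw [if_neg (by omega)]
    · rw [if_neg (by omega), pv_getD_replicate, if_pos (by simpa using hj),
          pv_getD_replicate, if_pos (by simpa using hk)]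
      simp only [pvAltF]
      rw [if_neg (by omega)]

-- ===== VERDICT (by name: the statement is the Claim_ definition above) =====
theorem divisible_group_sums_optimized_spec : Claim_equal_divisible_group_sums_optimized := by
  intro nums M D _ hpre
  unfold Spec_divisible_group_sums_optimized divisible_group_sums_optimized divisible_group_sums_optimized_alt
  by_cases hnil : nums = []
  · rw [if_pos hnil, if_pos hnil]
  · rcases hpre with h | ⟨hD0, hrest⟩
    · exact absurd h hnil
    rw [if_neg hnil, if_neg hnil, if_neg hD0, if_neg hD0]
    by_cases hMr : M < 0 ∨ M > PySem.List.len nums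
    · rw [if_pos hMr, if_pos hMr]
    · rw [if_neg hMr, if_neg hMr]
      rw [PySem.List.len_eq] at hMr hrest
      have hD : 0 < D := by omega
      have hM : 0 ≤ M := by omega
      show PySem.List.pyGetD (PySem.List.pyGetD
          (((PySem.List.pyRange 0 (PySem.List.len nums) 1).foldl
            (fun st i => (fun (st : List (List Int) × List (List Int)) num =>
          let md := PySem.Int.mod (PySem.Int.mod num D + D) D
          let nd1 := (PySem.List.pyRange 0 (M + 1) 1).foldl
            (fun t j => PySem.List.pySetD t j (PySem.List.slice (PySem.List.pyGetD st.1 j []) none none)) st.2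
          let nd2 := (PySem.List.pyRange 1 (M + 1) 1).foldl
            (fun t j => (PySem.List.pyRange 0 D 1).foldl
              (fun t k => PySem.List.pySetD t j (PySem.List.pySetD (PySem.List.pyGetD t j []) k
                (PySem.List.pyGetD (PySem.List.pyGetD t j []) k 0 +
                 PySem.List.pyGetD (PySem.List.pyGetD st.1 (j - 1) [])
                   (PySem.Int.mod (k - md + D) D) 0))) t) nd1
          let nd3 := (PySem.List.pyRange 0 (M + 1) 1).foldl
            (fun t j => PySem.List.pySetD t j (List.replicate D.toNat (0 : Int))) st.1
          (nd2, nd3)) st (PySem.List.pyGetD nums i 0))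
            ((PySem.List.pySetD (List.replicate (M + 1).toNat (List.replicate D.toNat (0 : Int))) 0
        (PySem.List.pySetD
          (PySem.List.pyGetD (List.replicate (M + 1).toNat (List.replicate D.toNat (0 : Int))) 0 []) 0 1)), (List.replicate (M + 1).toNat (List.replicate D.toNat (0 : Int))))).1) M []) 0 0 = pvAltF D nums M 0
      have hfold : (PySem.List.pyRange 0 (PySem.List.len nums) 1).foldl
            (fun st i => (fun (st : List (List Int) × List (List Int)) num =>
          let md := PySem.Int.mod (PySem.Int.mod num D + D) D
          let nd1 := (PySem.List.pyRange 0 (M + 1) 1).foldl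
            (fun t j => PySem.List.pySetD t j (PySem.List.slice (PySem.List.pyGetD st.1 j []) none none)) st.2
          let nd2 := (PySem.List.pyRange 1 (M + 1) 1).foldl
            (fun t j => (PySem.List.pyRange 0 D 1).foldl
              (fun t k => PySem.List.pySetD t j (PySem.List.pySetD (PySem.List.pyGetD t j []) k
                (PySem.List.pyGetD (PySem.List.pyGetD t j []) k 0 +
                 PySem.List.pyGetD (PySem.List.pyGetD st.1 (j - 1) [])
                   (PySem.Int.mod (k - md + D) D) 0))) t) nd1
          let nd3 := (PySem.List.pyRange 0 (M + 1) 1).foldl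
            (fun t j => PySem.List.pySetD t j (List.replicate D.toNat (0 : Int))) st.1
          (nd2, nd3)) st (PySem.List.pyGetD nums i 0))
            ((PySem.List.pySetD (List.replicate (M + 1).toNat (List.replicate D.toNat (0 : Int))) 0
        (PySem.List.pySetD
          (PySem.List.pyGetD (List.replicate (M + 1).toNat (List.replicate D.toNat (0 : Int))) 0 []) 0 1)), (List.replicate (M + 1).toNat (List.replicate D.toNat (0 : Int))))
          = nums.foldl (fun (st : List (List Int) × List (List Int)) num =>
          let md := PySem.Int.mod (PySem.Int.mod num D + D) D
          let nd1 := (PySem.List.pyRange 0 (M + 1) 1).foldl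
            (fun t j => PySem.List.pySetD t j (PySem.List.slice (PySem.List.pyGetD st.1 j []) none none)) st.2
          let nd2 := (PySem.List.pyRange 1 (M + 1) 1).foldl
            (fun t j => (PySem.List.pyRange 0 D 1).foldl
              (fun t k => PySem.List.pySetD t j (PySem.List.pySetD (PySem.List.pyGetD t j []) k
                (PySem.List.pyGetD (PySem.List.pyGetD t j []) k 0 +
                 PySem.List.pyGetD (PySem.List.pyGetD st.1 (j - 1) [])
                   (PySem.Int.mod (k - md + D) D) 0))) t) nd1
          let nd3 := (PySem.List.pyRange 0 (M + 1) 1).foldl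
            (fun t j => PySem.List.pySetD t j (List.replicate D.toNat (0 : Int))) st.1
          (nd2, nd3)) ((PySem.List.pySetD (List.replicate (M + 1).toNat (List.replicate D.toNat (0 : Int))) 0
        (PySem.List.pySetD
          (PySem.List.pyGetD (List.replicate (M + 1).toNat (List.replicate D.toNat (0 : Int))) 0 []) 0 1)), (List.replicate (M + 1).toNat (List.replicate D.toNat (0 : Int)))) :=
        PySem.List.foldl_pyRange_zero_pyGetD nums 0
          (fun (st : List (List Int) × List (List Int)) num =>
          let md := PySem.Int.mod (PySem.Int.mod num D + D) D
          let nd1 := (PySem.List.pyRange 0 (M + 1) 1).foldl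
            (fun t j => PySem.List.pySetD t j (PySem.List.slice (PySem.List.pyGetD st.1 j []) none none)) st.2
          let nd2 := (PySem.List.pyRange 1 (M + 1) 1).foldl
            (fun t j => (PySem.List.pyRange 0 D 1).foldl
              (fun t k => PySem.List.pySetD t j (PySem.List.pySetD (PySem.List.pyGetD t j []) k
                (PySem.List.pyGetD (PySem.List.pyGetD t j []) k 0 +
                 PySem.List.pyGetD (PySem.List.pyGetD st.1 (j - 1) [])
                   (PySem.Int.mod (k - md + D) D) 0))) t) nd1
          let nd3 := (PySem.List.pyRange 0 (M + 1) 1).foldl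
            (fun t j => PySem.List.pySetD t j (List.replicate D.toNat (0 : Int))) st.1
          (nd2, nd3))
          ((PySem.List.pySetD (List.replicate (M + 1).toNat (List.replicate D.toNat (0 : Int))) 0
        (PySem.List.pySetD
          (PySem.List.pyGetD (List.replicate (M + 1).toNat (List.replicate D.toNat (0 : Int))) 0 []) 0 1)), (List.replicate (M + 1).toNat (List.replicate D.toNat (0 : Int))))
      rw [hfold]
      obtain ⟨hl, hrow, hval⟩ := pv_loop D M hD hM nums [] (PySem.List.pySetD (List.replicate (M + 1).toNat (List.replicate D.toNat (0 : Int))) 0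
        (PySem.List.pySetD
          (PySem.List.pyGetD (List.replicate (M + 1).toNat (List.replicate D.toNat (0 : Int))) 0 []) 0 1)) (List.replicate (M + 1).toNat (List.replicate D.toNat (0 : Int)))
        (pv_init D M hM) (by simp)
      have hv := hval M.toNat 0 (by omega) (by omega)
      rw [List.nil_append] at hv
      rw [pv_pyGetD_nonneg _ M [] hM, PySem.List.pyGetD_zero, hv,
          Int.toNat_of_nonneg hM]
      norm_num
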